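-- pv_equiv track=rewrite | github.com/wamaco/wemo-check | 16_number_theory/prac-problems/distinct_prime_fac.py | first_k_consecutive_with_k_prime_factors
-- ===== SOURCE A (Python) =====
-- def first_k_consecutive_with_k_prime_factors(k, limit=1000000):
--     # Step 1: Create an array to count distinct prime factors for every number
--     factor_count = [0] * (limit + 1)
--
--     # Modified Sieve of Eratosthenes: for each prime p, mark all multiples of p
--     for p in range(2, limit + 1):
--         if factor_count[p] == 0:  # p is prime
--             for multiple in range(p, limit + 1, p):
--                 factor_count[multiple] += 1
--
--     # Step 2: Search for k consecutive numbers with exactly k distinct prime factors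
--     consecutive = 0
--     for i in range(2, limit + 1):
--         if factor_count[i] == k:
--             consecutive += 1
--             if consecutive == k:
--                 return i - k + 1  # start of the sequence
--         else:
--             consecutive = 0
--
--     return -1  # not found within the limit
-- ===== SOURCE B (Python) =====
-- def _num_distinct_prime_factors(n):
--     # trial division: count distinct prime factors of n
--     c = 0
--     d = 2
--     while d * d <= n:
--         if n % d == 0:
--             c += 1
--             while n % d == 0:
--                 n //= d
--         d += 1
--     if n > 1:
--         c += 1
--     return c
--
--
-- def first_k_consecutive_with_k_prime_factors(k, limit=1000000):
--     # No sieve array: compute each number's distinct-prime-factor count on demand,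
--     # returning as soon as the run of k matches is complete.
--     consecutive = 0
--     for i in range(2, limit + 1):
--         if _num_distinct_prime_factors(i) == k:
--             consecutive += 1
--             if consecutive == k:
--                 return i - k + 1
--         else:
--             consecutive = 0
--     return -1
-- ===== Notes on version B (the rewrite author's own statement) =====
-- stated objective: alternative
-- what changed: Replaced the full Sieve-of-Eratosthenes factor-count array (always built over the whole range) by on-demand trial-division counting of each number's distinct prime factors inside the scanning loop, returning as soon as the run is found, with no O(limit) array.
import Mathlib
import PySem

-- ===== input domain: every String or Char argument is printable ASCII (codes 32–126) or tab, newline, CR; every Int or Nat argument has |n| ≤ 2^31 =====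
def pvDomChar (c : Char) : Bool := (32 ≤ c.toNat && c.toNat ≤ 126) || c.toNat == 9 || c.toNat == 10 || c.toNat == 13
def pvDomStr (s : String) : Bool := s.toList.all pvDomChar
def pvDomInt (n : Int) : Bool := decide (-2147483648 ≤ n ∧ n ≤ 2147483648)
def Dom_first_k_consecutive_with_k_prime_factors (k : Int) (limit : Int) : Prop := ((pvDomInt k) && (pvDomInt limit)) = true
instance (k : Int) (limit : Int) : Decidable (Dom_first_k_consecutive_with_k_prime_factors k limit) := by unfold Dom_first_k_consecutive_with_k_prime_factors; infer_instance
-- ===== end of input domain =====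

-- B replaces A's full Sieve-of-Eratosthenes factor-count array by on-demand trial-division
-- counting inside the scanning loop (alternative algorithm, no O(limit) array).

-- ===== PORT A =====
-- A's sieve body for one p: if factor_count[p] == 0 (p prime), increment factor_count[m]
-- for every multiple m of p.  All indices produced by the ranges are ≥ 2 and < limit+1 =
-- len(factor_count), so .toNat/getD/set indexing is exact here.
def pvSieveStep (limit : Int) (fc : List Int) (p : Int) : List Int :=
  if fc.getD p.toNat 0 == 0 then
    (PySem.List.pyRange p (limit + 1) p).foldl
      (fun a m => a.set m.toNat (a.getD m.toNat 0 + 1)) fc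
  else fc

def pvSieve (limit : Int) : List Int :=
  (PySem.List.pyRange 2 (limit + 1) 1).foldl (pvSieveStep limit)
    (List.replicate (limit + 1).toNat 0)

-- A's scan loop with early return, encoded as a fold over (found?, consecutive)
def pvScanA (k : Int) (limit : Int) (fc : List Int) : Option Int × Int :=
  (PySem.List.pyRange 2 (limit + 1) 1).foldl
    (fun st i => match st with
      | (some v, c) => (some v, c)
      | (none, c) =>
        if fc.getD i.toNat 0 == k then
          if c + 1 == k then (some (i - k + 1), c + 1) else (none, c + 1)
        else (none, 0))
    (none, 0)

def first_k_consecutive_with_k_prime_factors (k : Int) (limit : Int) : Int :=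
  match (pvScanA k limit (pvSieve limit)).1 with
  | some v => v
  | none => -1

-- ===== PORT B =====
-- inner 'while n % d == 0: n //= d' of B's helper (the dite guards make it total; they
-- hold at every actual call site: d ≥ 2, n > 0)
def pvStrip (n d : Nat) : Nat :=
  if h : 2 ≤ d ∧ d ∣ n ∧ n ≠ 0 then pvStrip (n / d) d else n
termination_by n
decreasing_by exact Nat.div_lt_self (Nat.pos_of_ne_zero h.2.2) h.1

-- these two facts are needed by pvTrialGo's termination argument, so they stay here
theorem pvStrip_le (n d : Nat) : pvStrip n d ≤ n := by
  fun_induction pvStrip with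
  | case1 n h ih => exact le_trans ih (Nat.div_le_self _ _)
  | case2 n h => exact le_refl _

theorem pvStrip_lt {n d : Nat} (hd : 2 ≤ d) (hdvd : d ∣ n) (hn : n ≠ 0) :
    pvStrip n d < n := by
  rw [pvStrip, dif_pos ⟨hd, hdvd, hn⟩]
  exact lt_of_le_of_lt (pvStrip_le _ _) (Nat.div_lt_self (Nat.pos_of_ne_zero hn) hd)

-- B's helper _num_distinct_prime_factors: outer 'while d*d <= n' loop with counter c,
-- then the final 'if n > 1: c += 1'.  Called only with n ≥ 0, where Nat is exact.
def pvTrialGo (n d c : Nat) : Nat :=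
  if d * d ≤ n then
    if d ∣ n then pvTrialGo (pvStrip n d) (d + 1) (c + 1)
    else pvTrialGo n (d + 1) c
  else if 1 < n then c + 1 else c
termination_by n + n + 2 - d
decreasing_by
  · rcases Nat.lt_or_ge d 2 with h2 | h2
    · have hs := pvStrip_le n d
      omega
    · have hdd : 0 < d * d := Nat.mul_pos (by omega) (by omega)
      have hn : n ≠ 0 := by rintro rfl; omega
      have hs := pvStrip_lt h2 ‹d ∣ n› hn
      have hdn : d ≤ n := le_trans (Nat.le_mul_of_pos_left d (Nat.lt_of_lt_of_le Nat.zero_lt_two h2)) ‹d * d ≤ n›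
      omega
  · rcases Nat.lt_or_ge d 2 with h2 | h2
    · omega
    · have hdn : d ≤ n := le_trans (Nat.le_mul_of_pos_left d (Nat.lt_of_lt_of_le Nat.zero_lt_two h2)) ‹d * d ≤ n›
      omega

-- B's scan loop: same run logic, but the count comes from trial division on demand
def pvScanB (k : Int) (limit : Int) : Option Int × Int :=
  (PySem.List.pyRange 2 (limit + 1) 1).foldl
    (fun st i => match st with
      | (some v, c) => (some v, c)
      | (none, c) =>
        if ((pvTrialGo i.toNat 2 0 : Nat) : Int) == k then
          if c + 1 == k then (some (i - k + 1), c + 1) else (none, c + 1)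
        else (none, 0))
    (none, 0)

def first_k_consecutive_with_k_prime_factors_alt (k : Int) (limit : Int) : Int :=
  match (pvScanB k limit).1 with
  | some v => v
  | none => -1

-- ===== PRECONDITION & SPEC =====
def Spec_first_k_consecutive_with_k_prime_factors (k : Int) (limit : Int) (out : Int) : Prop := out = first_k_consecutive_with_k_prime_factors_alt k limit
instance (k : Int) (limit : Int) (out : Int) : Decidable (Spec_first_k_consecutive_with_k_prime_factors k limit out) := by unfold Spec_first_k_consecutive_with_k_prime_factors; infer_instance

-- ===== CLAIM (what is proved, stated in full; the proofs are below) =====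
def Claim_equal_first_k_consecutive_with_k_prime_factors : Prop := ∀ (k : Int) (limit : Int), Dom_first_k_consecutive_with_k_prime_factors k limit → Spec_first_k_consecutive_with_k_prime_factors k limit (first_k_consecutive_with_k_prime_factors k limit)

-- ===== LEMMAS AND PROOFS =====

-- ---- B's trial division computes the number of distinct prime factors ----

theorem pvStrip_spec (n d : Nat) (hd : Nat.Prime d) : n ≠ 0 →
    pvStrip n d ≠ 0 ∧ pvStrip n d ∣ n ∧ ¬ d ∣ pvStrip n d ∧
      ∀ p : Nat, Nat.Prime p → p ≠ d → (p ∣ pvStrip n d ↔ p ∣ n) := by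
  fun_induction pvStrip n d with
  | case1 n h ih =>
    intro hn
    have hnd : n / d ≠ 0 := by
      have := Nat.div_pos (Nat.le_of_dvd (Nat.pos_of_ne_zero hn) h.2.1) (by omega : 0 < d)
      omega
    obtain ⟨h0, hdvd, hnd2, hiff⟩ := ih hnd
    refine ⟨h0, hdvd.trans (Nat.div_dvd_of_dvd h.2.1), hnd2, ?_⟩
    intro p hp hpd
    rw [hiff p hp hpd]
    constructor
    · intro hpn; exact hpn.trans (Nat.div_dvd_of_dvd h.2.1)
    · intro hpn
      have hmul : n = d * (n / d) := (Nat.mul_div_cancel' h.2.1).symm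
      rcases (Nat.Prime.dvd_mul hp).1 (hmul ▸ hpn) with hc | hc
      · exact absurd ((Nat.prime_dvd_prime_iff_eq hp hd).1 hc) hpd
      · exact hc
  | case2 n h =>
    intro hn
    have hnotd : ¬ d ∣ n := fun hdn => h ⟨hd.two_le, hdn, hn⟩
    exact ⟨hn, dvd_refl n, hnotd, fun p _ _ => Iff.rfl⟩

theorem pvTrialGo_eq (n d c : Nat) :
    2 ≤ d → (∀ p : Nat, Nat.Prime p → p ∣ n → d ≤ p) →
    pvTrialGo n d c = c + n.primeFactors.card := by
  fun_induction pvTrialGo n d c with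
  | case1 n d c h1 h2 ih =>
    intro hd2 hmin
    have hn0 : n ≠ 0 := by
      have : 0 < d * d := Nat.mul_pos (by omega) (by omega)
      omega
    have hdp : Nat.Prime d := by
      rw [Nat.prime_def_minFac]
      refine ⟨hd2, ?_⟩
      have ha : d.minFac ∣ n := (Nat.minFac_dvd d).trans h2
      have hb : Nat.Prime d.minFac := Nat.minFac_prime (by omega)
      have hc : d ≤ d.minFac := hmin _ hb ha
      have he : d.minFac ≤ d := Nat.minFac_le (by omega)
      omega
    obtain ⟨hs0, hsdvd, hsnd, hsiff⟩ := pvStrip_spec n d hdp hn0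
    have hpf : (pvStrip n d).primeFactors = n.primeFactors.erase d := by
      ext p
      rw [Finset.mem_erase, Nat.mem_primeFactors, Nat.mem_primeFactors]
      constructor
      · rintro ⟨hp, hpd, -⟩
        have hne : p ≠ d := by rintro rfl; exact hsnd hpd
        exact ⟨hne, hp, (hsiff p hp hne).1 hpd, hn0⟩
      · rintro ⟨hne, hp, hpn, -⟩
        exact ⟨hp, (hsiff p hp hne).2 hpn, hs0⟩
    have hdmem : d ∈ n.primeFactors := Nat.mem_primeFactors.2 ⟨hdp, h2, hn0⟩
    have hcard : (pvStrip n d).primeFactors.card = n.primeFactors.card - 1 := by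
      rw [hpf, Finset.card_erase_of_mem hdmem]
    have hpos : 1 ≤ n.primeFactors.card := Finset.card_pos.2 ⟨d, hdmem⟩
    have hmin' : ∀ p : Nat, Nat.Prime p → p ∣ pvStrip n d → d + 1 ≤ p := by
      intro p hp hpd
      have hne : p ≠ d := by rintro rfl; exact hsnd hpd
      have := hmin p hp ((hsiff p hp hne).1 hpd)
      omega
    rw [ih (by omega) hmin', hcard]
    omega
  | case2 n d c h1 h2 ih =>
    intro hd2 hmin
    apply ih (by omega)
    intro p hp hpd
    have := hmin p hp hpd
    have hne : p ≠ d := by rintro rfl; exact h2 hpd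
    omega
  | case3 n d c h1 h2 =>
    intro hd2 hmin
    have hnp : Nat.Prime n := by
      by_contra hc
      have hm := Nat.minFac_prime (by omega : n ≠ 1)
      have ha : d ≤ n.minFac := hmin _ hm (Nat.minFac_dvd n)
      have hsq := Nat.minFac_sq_le_self (by omega : 0 < n) hc
      have hb : d * d ≤ n.minFac * n.minFac := Nat.mul_le_mul ha ha
      have hcc : n.minFac * n.minFac = n.minFac ^ 2 := by ring
      omega
    rw [hnp.primeFactors]
    simp
  | case4 n d c h1 h2 =>
    intro _ _
    have : n = 0 ∨ n = 1 := by omega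
    rcases this with rfl | rfl <;> simp

theorem pvTrial_count (n : Nat) : pvTrialGo n 2 0 = n.primeFactors.card := by
  have := pvTrialGo_eq n 2 0 (le_refl 2) (fun p hp _ => hp.two_le)
  omega

-- ---- the sieve entry at i is the number of distinct prime factors of i ----

theorem pv_getD_set (l : List Int) (i j : Nat) (a : Int) :
    (l.set i a).getD j 0 = if i = j ∧ i < l.length then a else l.getD j 0 := by
  simp only [List.getD_eq_getElem?_getD, List.getElem?_set]
  split_ifs with h1 h2 h3 h4 <;> simp_all <;> omega

theorem pv_getD_replicate (L j : Nat) : (List.replicate L (0:Int)).getD j 0 = 0 := by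
  simp only [List.getD_eq_getElem?_getD, List.getElem?_replicate]
  split <;> simp

theorem pv_incr_len (ms : List Int) (fc : List Int) :
    (ms.foldl (fun a m => a.set m.toNat (a.getD m.toNat 0 + 1)) fc).length = fc.length := by
  induction ms generalizing fc with
  | nil => rfl
  | cons h t ih => simp only [List.foldl_cons]; rw [ih]; simp

-- incrementing at a nodup list of nonnegative positions adds 1 exactly at members
theorem pv_incr_fold (ms : List Int) (fc : List Int) (hnd : ms.Nodup)
    (hpos : ∀ m ∈ ms, 0 ≤ m) (j : Nat) (hj : j < fc.length) :
    (ms.foldl (fun a m => a.set m.toNat (a.getD m.toNat 0 + 1)) fc).getD j 0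
      = fc.getD j 0 + (if (j : Int) ∈ ms then 1 else 0) := by
  induction ms generalizing fc with
  | nil => simp
  | cons h t ih =>
    simp only [List.foldl_cons]
    have hh0 : 0 ≤ h := hpos h (List.mem_cons_self ..)
    rw [ih (fc.set h.toNat (fc.getD h.toNat 0 + 1)) hnd.of_cons
      (fun m hm => hpos m (List.mem_cons_of_mem _ hm)) (by simp [hj])]
    rw [pv_getD_set]
    by_cases hje : (j : Int) = h
    · have hjn : h.toNat = j := by omega
      have hnotin : (j:Int) ∉ t := by rw [hje]; exact (List.nodup_cons.1 hnd).1
      rw [if_pos ⟨hjn, by rw [hjn]; exact hj⟩, if_neg hnotin,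
        if_pos (by rw [hje]; exact List.mem_cons_self ..), hjn]
      ring
    · have hjn : h.toNat ≠ j := by omega
      rw [if_neg (fun hc => hjn hc.1)]
      congr 1
      simp [List.mem_cons, hje]

theorem pv_nodup_pyRange (a b s : Int) (hs : 0 < s) : (PySem.List.pyRange a b s).Nodup := by
  rw [PySem.List.pyRange_of_pos a b hs]
  refine List.Nodup.map ?_ List.nodup_range
  intro x y hxy
  have h1 : s * (x:Int) = s * y := by linarith
  have h2 := mul_left_cancel₀ (ne_of_gt hs) h1
  exact_mod_cast h2

-- sieve invariant: after processing p = 2 .. 1+n, entry j counts the prime factors ≤ 1+n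
theorem pvSieve_fold (limit : Int) (n : Nat) (h : 2 + (n:Int) ≤ limit + 1) :
    ((PySem.List.pyRange 2 (2 + (n:Int)) 1).foldl (pvSieveStep limit)
        (List.replicate (limit + 1).toNat 0)).length = (limit + 1).toNat ∧
    ∀ j : Nat, j < (limit + 1).toNat →
      ((PySem.List.pyRange 2 (2 + (n:Int)) 1).foldl (pvSieveStep limit)
        (List.replicate (limit + 1).toNat 0)).getD j 0
        = ((j.primeFactors.filter (fun p => p ≤ 1 + n)).card : Int) := by
  induction n with
  | zero =>
    rw [show (2 + ((0:Nat):Int)) = 2 by norm_num, PySem.List.pyRange_one_eq_nil (by omega)]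
    simp only [List.foldl_nil]
    refine ⟨by simp, ?_⟩
    intro j hj
    have hemp : j.primeFactors.filter (fun p => p ≤ 1 + 0) = ∅ := by
      apply Finset.filter_false_of_mem
      intro p hp
      have := (Nat.prime_of_mem_primeFactors hp).two_le
      omega
    rw [hemp, pv_getD_replicate]
    simp
  | succ m ih =>
    have h' : 2 + (m:Int) ≤ limit + 1 := by push_cast at h ⊢; omega
    obtain ⟨ihl, ihv⟩ := ih h'
    have hsplit : PySem.List.pyRange 2 (2 + ((m+1:Nat):Int)) 1
        = PySem.List.pyRange 2 (2 + (m:Int)) 1 ++ [2 + (m:Int)] := by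
      have he : (2 + ((m+1:Nat):Int)) = (2 + (m:Int)) + 1 := by push_cast; ring
      rw [he, PySem.List.pyRange_one_succ_right (by omega)]
    rw [hsplit, List.foldl_append]
    set fc := (PySem.List.pyRange 2 (2 + (m:Int)) 1).foldl (pvSieveStep limit)
      (List.replicate (limit + 1).toNat 0) with hfc
    simp only [List.foldl_cons, List.foldl_nil]
    have hqt : ((2 + (m:Int))).toNat = 2 + m := by omega
    have hql : (2 + (m:Int)).toNat < (limit+1).toNat := by push_cast at h; omega
    have hfcq : fc.getD (2 + (m:Int)).toNat 0
        = (((2+m).primeFactors.filter (fun p => p ≤ 1 + m)).card : Int) := by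
      rw [ihv _ hql, hqt]
    have hqprime_iff : ((2+m).primeFactors.filter (fun p => p ≤ 1 + m)) = ∅ ↔ Nat.Prime (2+m) := by
      constructor
      · intro he
        rw [Nat.prime_def_minFac]
        refine ⟨by omega, ?_⟩
        by_contra hne
        have hmf := Nat.minFac_prime (show (2+m) ≠ 1 by omega)
        have hdvd := Nat.minFac_dvd (2+m)
        have hle : (2+m).minFac ≤ 2+m := Nat.minFac_le (by omega)
        have hmem : (2+m).minFac ∈ (2+m).primeFactors.filter (fun p => p ≤ 1+m) := by
          rw [Finset.mem_filter, Nat.mem_primeFactors]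
          exact ⟨⟨hmf, hdvd, by omega⟩, by omega⟩
        rw [he] at hmem
        exact absurd hmem (Finset.notMem_empty _)
      · intro hp
        apply Finset.filter_false_of_mem
        intro p hpm
        have h1 := Nat.mem_primeFactors.1 hpm
        have h2 : p = 2+m := (Nat.prime_dvd_prime_iff_eq h1.1 hp).1 h1.2.1
        omega
    unfold pvSieveStep
    by_cases hp : Nat.Prime (2+m)
    · have h0 : fc.getD (2 + (m:Int)).toNat 0 = 0 := by
        rw [hfcq, hqprime_iff.mpr hp]
        simp
      have hcond : (fc.getD (2 + (m:Int)).toNat 0 == 0) = true := by rw [h0]; rfl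
      rw [hcond, if_pos rfl]
      have hlen : ∀ (l : List Int), ((PySem.List.pyRange (2 + (m:Int)) (limit + 1) (2 + (m:Int))).foldl
          (fun a mm => a.set mm.toNat (a.getD mm.toNat 0 + 1)) l).length = l.length :=
        fun l => pv_incr_len _ l
      refine ⟨by rw [hlen, ihl], ?_⟩
      intro j hj
      rw [pv_incr_fold _ fc (pv_nodup_pyRange _ _ _ (by omega))
        (fun x hx => by
          have := (PySem.List.mem_pyRange_iff_of_pos (by omega) x).1 hx
          omega)
        j (by rw [ihl]; exact hj)]
      rw [ihv j hj]
      have hmemiff : ((j:Int) ∈ PySem.List.pyRange (2 + (m:Int)) (limit + 1) (2 + (m:Int)))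
          ↔ (2+m) ∈ j.primeFactors := by
        rw [PySem.List.mem_pyRange_iff_of_pos (by omega), Nat.mem_primeFactors]
        constructor
        · rintro ⟨hle, hlt, hdv⟩
          have hdvj : (2 + (m:Int)) ∣ (j:Int) := by
            have hadd := dvd_add hdv (dvd_refl (2 + (m:Int)))
            simpa using hadd
          refine ⟨hp, ?_, by omega⟩
          have : ((2+m : Nat) : Int) ∣ (j:Int) := by push_cast; convert hdvj using 2 <;> push_cast <;> ring
          exact_mod_cast this
        · rintro ⟨-, hdvj, hj0⟩
          have hjpos : 0 < j := Nat.pos_of_ne_zero hj0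
          have hle : 2 + m ≤ j := Nat.le_of_dvd hjpos hdvj
          have hdvi : (2 + (m:Int)) ∣ (j:Int) := by exact_mod_cast Int.natCast_dvd_natCast.2 hdvj
          refine ⟨by omega, by omega, ?_⟩
          exact dvd_sub hdvi (dvd_refl _)
      have hnat : (j.primeFactors.filter (fun p => p ≤ 1 + (m+1))).card
          = (j.primeFactors.filter (fun p => p ≤ 1 + m)).card
            + (if (2+m) ∈ j.primeFactors then 1 else 0) := by
        have hsetsplit : j.primeFactors.filter (fun p => p ≤ 1 + (m+1))
            = j.primeFactors.filter (fun p => p ≤ 1 + m)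
              ∪ j.primeFactors.filter (fun p => p = 2 + m) := by
          ext p
          simp only [Finset.mem_filter, Finset.mem_union]
          constructor
          · rintro ⟨hm', hle⟩
            rcases Nat.lt_or_ge p (2+m) with hlt | hge
            · exact Or.inl ⟨hm', by omega⟩
            · exact Or.inr ⟨hm', by omega⟩
          · rintro (⟨hm', hle⟩ | ⟨hm', he⟩) <;> exact ⟨hm', by omega⟩
        have hdisj : Disjoint (j.primeFactors.filter (fun p => p ≤ 1 + m))
            (j.primeFactors.filter (fun p => p = 2 + m)) := by
          rw [Finset.disjoint_left]
          intro p hp1 hp2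
          rw [Finset.mem_filter] at hp1 hp2
          omega
        rw [hsetsplit, Finset.card_union_of_disjoint hdisj, Finset.filter_eq']
        by_cases hmem : (2+m) ∈ j.primeFactors
        · rw [if_pos hmem, if_pos hmem]; simp
        · rw [if_neg hmem, if_neg hmem]; simp
      rw [hnat]
      by_cases hmem : (2+m) ∈ j.primeFactors
      · rw [if_pos hmem, if_pos (hmemiff.mpr hmem)]
        push_cast; ring
      · rw [if_neg hmem, if_neg (fun hc => hmem (hmemiff.mp hc))]
        push_cast; ring
    · have hne : fc.getD (2 + (m:Int)).toNat 0 ≠ 0 := by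
        rw [hfcq]
        intro hc
        have : ((2+m).primeFactors.filter (fun p => p ≤ 1 + m)).card = 0 := by exact_mod_cast hc
        exact hp (hqprime_iff.mp (Finset.card_eq_zero.mp this))
      have hcond : (fc.getD (2 + (m:Int)).toNat 0 == 0) = false := beq_eq_false_iff_ne.mpr hne
      rw [hcond, if_neg (fun hc => Bool.false_ne_true hc)]
      refine ⟨ihl, ?_⟩
      intro j hj
      rw [ihv j hj]
      congr 2
      apply Finset.filter_congr
      intro p hpm
      have hpp := (Nat.prime_of_mem_primeFactors hpm)
      have hpne : p ≠ 2 + m := by rintro rfl; exact hp hpp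
      constructor
      · intro hle; omega
      · intro hle; omega

theorem pvSieve_entry (limit : Int) (i : Int) (h2 : 2 ≤ i) (hi : i < limit + 1) :
    (pvSieve limit).getD i.toNat 0 = ((i.toNat).primeFactors.card : Int) := by
  have hcast : 2 + (((limit - 1).toNat : Nat) : Int) = limit + 1 := by omega
  have h := pvSieve_fold limit (limit - 1).toNat (by omega)
  rw [hcast] at h
  obtain ⟨-, hv⟩ := h
  have hj : i.toNat < (limit+1).toNat := by omega
  unfold pvSieve
  rw [hv i.toNat hj]
  congr 2
  apply Finset.filter_true_of_mem
  intro p hp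
  have h1 := Nat.mem_primeFactors.1 hp
  have h2' : p ≤ i.toNat := Nat.le_of_dvd (Nat.pos_of_ne_zero h1.2.2) h1.2.1
  omega

-- ===== VERDICT (by name: the statement is the Claim_ definition above) =====
theorem first_k_consecutive_with_k_prime_factors_spec : Claim_equal_first_k_consecutive_with_k_prime_factors := by
  intro k limit _
  unfold Spec_first_k_consecutive_with_k_prime_factors
  unfold first_k_consecutive_with_k_prime_factors first_k_consecutive_with_k_prime_factors_alt
  have hscan : pvScanA k limit (pvSieve limit) = pvScanB k limit := by
    unfold pvScanA pvScanB
    apply PySem.List.foldl_congr_mem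
    intro acc x hx
    rw [PySem.List.mem_pyRange_one] at hx
    have hval : (pvSieve limit).getD x.toNat 0 = ((pvTrialGo x.toNat 2 0 : Nat) : Int) := by
      rw [pvSieve_entry limit x hx.1 hx.2, pvTrial_count]
    simp only [hval]
  rw [hscan]
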